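-- pv_equiv track=rewrite | github.com/lidia-veli/Laberinto | modulos/estructura_lab.py | agregar_paredes_lab
-- ===== SOURCE A (Python) =====
-- def agregar_paredes_lab(laberinto, muro, FILAS, COLUMNAS):
--     '''Función que agrega las paredes al laberinto,
--     dada una tupla con las coordenadas en las que están las paredes
--
--     -INPUT----------------
--     laberinto: lista
--         laberinto vacío
--     muro: tup
--         tupla de coordenadas en las que hay muro
--     FILAS: int
--         número de filas del laberinto
--     COLUMNAS: int
--         número de columnas del laberinto
--
--     -OUTPUT---------------
--     mi_laberinto: list
--         laberinto con paredes
--     '''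
--     for f in range(FILAS): #recorremos las filas
--         for c in range(COLUMNAS): #recorremos las columnas
--             for punto in muro:
--                 if punto[0]==f and punto[1]==c:
--                     laberinto[f][c]='X' #sustituimos el hueco por un muro
--                 else:
--                     pass
--
--     return laberinto
-- ===== SOURCE B (Python) =====
-- def agregar_paredes_lab(laberinto, muro, FILAS, COLUMNAS):
--     '''Single pass over the wall coordinates: set each in-range cell directly.'''
--     for punto in muro:
--         if len(punto) >= 2 and 0 <= punto[0] < FILAS and 0 <= punto[1] < COLUMNAS:
--             laberinto[punto[0]][punto[1]] = 'X'
--     return laberinto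
-- ===== Notes on version B (the rewrite author's own statement) =====
-- stated objective: faster
-- what changed: Instead of scanning every grid cell and, for each, every wall point (triple nested loop), B makes a single pass over the wall list and sets each in-range coordinate directly.
import Mathlib
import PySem

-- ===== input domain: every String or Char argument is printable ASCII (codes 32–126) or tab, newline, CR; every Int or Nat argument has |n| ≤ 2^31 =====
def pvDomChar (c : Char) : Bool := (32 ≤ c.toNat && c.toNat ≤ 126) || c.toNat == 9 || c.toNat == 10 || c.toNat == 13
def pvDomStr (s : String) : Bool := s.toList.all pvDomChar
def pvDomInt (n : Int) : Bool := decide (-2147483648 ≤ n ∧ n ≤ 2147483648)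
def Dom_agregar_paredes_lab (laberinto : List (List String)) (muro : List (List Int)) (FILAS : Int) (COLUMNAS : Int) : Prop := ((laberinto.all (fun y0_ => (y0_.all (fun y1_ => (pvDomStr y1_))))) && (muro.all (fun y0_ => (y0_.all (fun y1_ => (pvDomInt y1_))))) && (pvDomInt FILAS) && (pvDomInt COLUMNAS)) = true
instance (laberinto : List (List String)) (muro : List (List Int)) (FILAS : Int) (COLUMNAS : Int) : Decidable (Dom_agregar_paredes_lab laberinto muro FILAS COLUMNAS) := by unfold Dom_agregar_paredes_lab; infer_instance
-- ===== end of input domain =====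

-- B replaces A's full-grid triple nested scan by a single pass over the wall list (asymptotically faster);
-- both mutate `laberinto` in place in Python — the equivalence proved here is about the RETURN value.

-- ===== PORT A =====
-- `laberinto[f][c] = 'X'`: in-range under Pre_; List.set is a no-op out of range (Python raises there, excluded by Pre_).
def setCell (lab : List (List String)) (i j : Nat) : List (List String) :=
  lab.set i ((lab.getD i []).set j "X")

def agregar_paredes_lab (laberinto : List (List String)) (muro : List (List Int)) (FILAS : Int) (COLUMNAS : Int) : List (List String) :=
  (PySem.List.pyRange 0 FILAS 1).foldl (fun lab1 f =>
    (PySem.List.pyRange 0 COLUMNAS 1).foldl (fun lab2 c =>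
      muro.foldl (fun lab3 punto =>
        match PySem.List.pyGet? punto 0 with
        | none => lab3  -- Python: IndexError on punto[0]; excluded by Pre_
        | some p0 =>
          if p0 = f then
            match PySem.List.pyGet? punto 1 with
            | none => lab3  -- Python: IndexError on punto[1]; excluded by Pre_
            | some p1 => if p1 = c then setCell lab3 f.toNat c.toNat else lab3
          else lab3) lab2) lab1) laberinto

-- ===== PORT B =====
def agregar_paredes_lab_alt (laberinto : List (List String)) (muro : List (List Int)) (FILAS : Int) (COLUMNAS : Int) : List (List String) :=
  muro.foldl (fun lab punto =>
    if 2 ≤ punto.length ∧ 0 ≤ punto.getD 0 0 ∧ punto.getD 0 0 < FILAS ∧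
        0 ≤ punto.getD 1 0 ∧ punto.getD 1 0 < COLUMNAS then
      setCell lab (punto.getD 0 0).toNat (punto.getD 1 0).toNat
    else lab) laberinto

-- ===== PRECONDITION & SPEC =====
-- Pre_ excludes exactly the inputs where Python A raises IndexError: (when both dimensions are positive)
-- a wall point that is empty, or whose first coordinate is in row range but has no second coordinate,
-- or a fully in-range wall point that falls outside the actual laberinto grid.
def Pre_agregar_paredes_lab (laberinto : List (List String)) (muro : List (List Int)) (FILAS : Int) (COLUMNAS : Int) : Prop :=
  FILAS ≤ 0 ∨ COLUMNAS ≤ 0 ∨ ∀ p ∈ muro, p ≠ [] ∧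
    ((0 ≤ p.getD 0 0 ∧ p.getD 0 0 < FILAS) →
      2 ≤ p.length ∧
      ((0 ≤ p.getD 1 0 ∧ p.getD 1 0 < COLUMNAS) →
        (p.getD 0 0).toNat < laberinto.length ∧
        (p.getD 1 0).toNat < (laberinto.getD (p.getD 0 0).toNat []).length))
instance (laberinto : List (List String)) (muro : List (List Int)) (FILAS : Int) (COLUMNAS : Int) : Decidable (Pre_agregar_paredes_lab laberinto muro FILAS COLUMNAS) := by unfold Pre_agregar_paredes_lab; infer_instance

def pvWitness_agregar_paredes_lab : List (List String) × List (List Int) × Int × Int :=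
  ([[".", "."], [".", "."]], [[0, 1], [1, 0]], 2, 2)

def Spec_agregar_paredes_lab (laberinto : List (List String)) (muro : List (List Int)) (FILAS : Int) (COLUMNAS : Int) (out : List (List String)) : Prop := out = agregar_paredes_lab_alt laberinto muro FILAS COLUMNAS
instance (laberinto : List (List String)) (muro : List (List Int)) (FILAS : Int) (COLUMNAS : Int) (out : List (List String)) : Decidable (Spec_agregar_paredes_lab laberinto muro FILAS COLUMNAS out) := by unfold Spec_agregar_paredes_lab; infer_instance

-- ===== CLAIM (what is proved, stated in full; the proofs are below) =====
def Claim_equal_agregar_paredes_lab : Prop := ∀ (laberinto : List (List String)) (muro : List (List Int)) (FILAS : Int) (COLUMNAS : Int), Dom_agregar_paredes_lab laberinto muro FILAS COLUMNAS → Pre_agregar_paredes_lab laberinto muro FILAS COLUMNAS → Spec_agregar_paredes_lab laberinto muro FILAS COLUMNAS (agregar_paredes_lab laberinto muro FILAS COLUMNAS)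
-- ===== LEMMAS AND PROOFS =====

-- "mark every cell (i, j) with P i j as a wall": the common normal form of both ports
def markGrid (P : Nat → Nat → Bool) (lab : List (List String)) : List (List String) :=
  lab.mapIdx (fun i row => row.mapIdx (fun j x => if P i j then "X" else x))

theorem length_markGrid (P : Nat → Nat → Bool) (lab : List (List String)) :
    (markGrid P lab).length = lab.length := by
  simp [markGrid]

theorem markGrid_congr {P Q : Nat → Nat → Bool} (lab : List (List String))
    (h : ∀ i j, P i j = Q i j) : markGrid P lab = markGrid Q lab := by
  have : P = Q := funext fun i => funext fun j => h i j
  rw [this]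

theorem mapIdx_id_str (l : List String) : l.mapIdx (fun _ x => x) = l := by
  apply List.ext_getElem (by simp)
  intro n h1 h2
  simp

theorem markGrid_false (lab : List (List String)) :
    markGrid (fun _ _ => false) lab = lab := by
  unfold markGrid
  simp only [Bool.false_eq_true, if_false]
  apply List.ext_getElem (by simp)
  intro i h1 h2
  simp [mapIdx_id_str]

theorem set_eq_mapIdx (l : List String) (b : Nat) :
    l.set b "X" = l.mapIdx (fun j x => if b = j then "X" else x) := by
  apply List.ext_getElem (by simp)
  intro j h1 h2
  simp [List.getElem_set]

theorem setCell_eq_markGrid (lab : List (List String)) (a b : Nat) :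
    setCell lab a b = markGrid (fun i j => decide (a = i) && decide (b = j)) lab := by
  apply List.ext_getElem (by simp [setCell, markGrid])
  intro i h1 h2
  have hiL : i < lab.length := by simpa [setCell] using h1
  simp only [markGrid, List.getElem_mapIdx, setCell, List.getElem_set]
  by_cases h : a = i
  · subst h
    rw [if_pos rfl, List.getD_eq_getElem lab [] hiL, set_eq_mapIdx]
    apply List.ext_getElem (by simp)
    intro j hj1 hj2
    simp
  · rw [if_neg h]
    conv_lhs => rw [← mapIdx_id_str lab[i]]
    apply List.ext_getElem (by simp)
    intro j hj1 hj2
    simp [h]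

theorem markGrid_markGrid (P Q : Nat → Nat → Bool) (lab : List (List String)) :
    markGrid P (markGrid Q lab) = markGrid (fun i j => Q i j || P i j) lab := by
  apply List.ext_getElem (by simp [length_markGrid])
  intro i h1 h2
  simp only [markGrid, List.getElem_mapIdx]
  apply List.ext_getElem (by simp)
  intro j hj1 hj2
  simp only [List.getElem_mapIdx]
  by_cases hQ : Q i j <;> by_cases hP : P i j <;> simp [hQ, hP]

theorem markGrid_setCell (P : Nat → Nat → Bool) (lab : List (List String)) (a b : Nat) :
    markGrid P (setCell lab a b)
      = markGrid (fun i j => (decide (a = i) && decide (b = j)) || P i j) lab := by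
  rw [setCell_eq_markGrid, markGrid_markGrid]

-- a fold of conditional single-cell writes is a markGrid
theorem foldl_condSet {γ : Type} (L : List γ) (P : γ → Prop) [DecidablePred P]
    (gi gj : γ → Nat) (lab : List (List String)) :
    L.foldl (fun l x => if P x then setCell l (gi x) (gj x) else l) lab
      = markGrid (fun i j => L.any (fun x => decide (P x) && decide (gi x = i) && decide (gj x = j))) lab := by
  induction L generalizing lab with
  | nil => simp [markGrid_false]
  | cons x L ih =>
    simp only [List.foldl_cons]
    by_cases hx : P x
    · rw [if_pos hx, ih, markGrid_setCell]
      apply markGrid_congr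
      intro i j
      simp [hx, List.any_cons, eq_comm]
    · rw [if_neg hx, ih]
      apply markGrid_congr
      intro i j
      simp [hx, List.any_cons]

-- a fold of markGrids is a markGrid
theorem foldl_markGrid {γ : Type} (L : List γ) (Q : γ → Nat → Nat → Bool) (lab : List (List String)) :
    L.foldl (fun l x => markGrid (Q x) l) lab
      = markGrid (fun i j => L.any (fun x => Q x i j)) lab := by
  induction L generalizing lab with
  | nil => simp [markGrid_false]
  | cons x L ih =>
    simp only [List.foldl_cons]
    rw [ih, markGrid_markGrid]
    apply markGrid_congr
    intro i j
    simp [List.any_cons]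

-- A's innermost muro step is a conditional single-cell write
theorem stepA_eq (punto : List Int) (f c : Int) (lab : List (List String)) :
    (match PySem.List.pyGet? punto 0 with
      | none => lab
      | some p0 =>
        if p0 = f then
          match PySem.List.pyGet? punto 1 with
          | none => lab
          | some p1 => if p1 = c then setCell lab f.toNat c.toNat else lab
        else lab)
      = if (PySem.List.pyGet? punto 0 = some f ∧ PySem.List.pyGet? punto 1 = some c)
        then setCell lab f.toNat c.toNat else lab := by
  cases h0 : PySem.List.pyGet? punto 0 with
  | none => simp
  | some p0 =>
    by_cases hf : p0 = f
    · subst hf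
      cases h1 : PySem.List.pyGet? punto 1 with
      | none => simp
      | some p1 =>
        by_cases hc : p1 = c
        · subst hc; simp
        · simp [hc]
    · simp [hf]

theorem portA_markGrid (laberinto : List (List String)) (muro : List (List Int)) (FILAS COLUMNAS : Int) :
    agregar_paredes_lab laberinto muro FILAS COLUMNAS
      = markGrid (fun i j =>
          (PySem.List.pyRange 0 FILAS 1).any fun f =>
            (PySem.List.pyRange 0 COLUMNAS 1).any fun c =>
              muro.any fun p =>
                decide (PySem.List.pyGet? p 0 = some f ∧ PySem.List.pyGet? p 1 = some c)
                  && decide (f.toNat = i) && decide (c.toNat = j)) laberinto := by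
  unfold agregar_paredes_lab
  have hmuro : ∀ (f c : Int) (lab : List (List String)),
      muro.foldl (fun lab3 punto =>
        match PySem.List.pyGet? punto 0 with
        | none => lab3
        | some p0 =>
          if p0 = f then
            match PySem.List.pyGet? punto 1 with
            | none => lab3
            | some p1 => if p1 = c then setCell lab3 f.toNat c.toNat else lab3
          else lab3) lab
      = markGrid (fun i j => muro.any fun p =>
          decide (PySem.List.pyGet? p 0 = some f ∧ PySem.List.pyGet? p 1 = some c)
            && decide (f.toNat = i) && decide (c.toNat = j)) lab := by
    intro f c lab
    have := foldl_condSet muro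
      (fun p => PySem.List.pyGet? p 0 = some f ∧ PySem.List.pyGet? p 1 = some c)
      (fun _ => f.toNat) (fun _ => c.toNat) lab
    rw [← this]
    exact PySem.List.foldl_congr_mem muro _ _ lab (fun lab3 punto _ => stepA_eq punto f c lab3)
  calc (PySem.List.pyRange 0 FILAS 1).foldl (fun lab1 f =>
          (PySem.List.pyRange 0 COLUMNAS 1).foldl (fun lab2 c =>
            muro.foldl _ lab2) lab1) laberinto
      = (PySem.List.pyRange 0 FILAS 1).foldl (fun lab1 f =>
          (PySem.List.pyRange 0 COLUMNAS 1).foldl (fun lab2 c =>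
            markGrid (fun i j => muro.any fun p =>
              decide (PySem.List.pyGet? p 0 = some f ∧ PySem.List.pyGet? p 1 = some c)
                && decide (f.toNat = i) && decide (c.toNat = j)) lab2) lab1) laberinto := by
        refine PySem.List.foldl_congr_mem _ _ _ laberinto (fun lab1 f _ => ?_)
        exact PySem.List.foldl_congr_mem _ _ _ lab1 (fun lab2 c _ => hmuro f c lab2)
    _ = (PySem.List.pyRange 0 FILAS 1).foldl (fun lab1 f =>
          markGrid (fun i j => (PySem.List.pyRange 0 COLUMNAS 1).any fun c =>
            muro.any fun p =>
              decide (PySem.List.pyGet? p 0 = some f ∧ PySem.List.pyGet? p 1 = some c)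
                && decide (f.toNat = i) && decide (c.toNat = j)) lab1) laberinto := by
        refine PySem.List.foldl_congr_mem _ _ _ laberinto (fun lab1 f _ => ?_)
        exact foldl_markGrid _ _ lab1
    _ = _ := foldl_markGrid _ _ laberinto

theorem portB_markGrid (laberinto : List (List String)) (muro : List (List Int)) (FILAS COLUMNAS : Int) :
    agregar_paredes_lab_alt laberinto muro FILAS COLUMNAS
      = markGrid (fun i j => muro.any fun p =>
          decide (2 ≤ p.length ∧ 0 ≤ p.getD 0 0 ∧ p.getD 0 0 < FILAS ∧
              0 ≤ p.getD 1 0 ∧ p.getD 1 0 < COLUMNAS)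
            && decide ((p.getD 0 0).toNat = i) && decide ((p.getD 1 0).toNat = j)) laberinto := by
  unfold agregar_paredes_lab_alt
  exact foldl_condSet muro _ _ _ laberinto

-- the two wall predicates coincide (no precondition needed: A's lazy indexing skips
-- exactly the malformed points B's length test skips)
theorem preds_eq (muro : List (List Int)) (FILAS COLUMNAS : Int) (i j : Nat) :
    ((PySem.List.pyRange 0 FILAS 1).any fun f =>
        (PySem.List.pyRange 0 COLUMNAS 1).any fun c =>
          muro.any fun p =>
            decide (PySem.List.pyGet? p 0 = some f ∧ PySem.List.pyGet? p 1 = some c)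
              && decide (f.toNat = i) && decide (c.toNat = j))
    = (muro.any fun p =>
        decide (2 ≤ p.length ∧ 0 ≤ p.getD 0 0 ∧ p.getD 0 0 < FILAS ∧
            0 ≤ p.getD 1 0 ∧ p.getD 1 0 < COLUMNAS)
          && decide ((p.getD 0 0).toNat = i) && decide ((p.getD 1 0).toNat = j)) := by
  rw [Bool.eq_iff_iff]
  simp only [List.any_eq_true, Bool.and_eq_true, decide_eq_true_eq, PySem.List.mem_pyRange_one]
  constructor
  · rintro ⟨f, ⟨hf0, hfF⟩, c, ⟨hc0, hcC⟩, p, hp, ⟨⟨h0, h1⟩, hfi⟩, hcj⟩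
    rw [PySem.List.pyGet?_of_nonneg p (by norm_num)] at h0 h1
    norm_num at h0 h1
    rw [List.getElem?_eq_some_iff] at h0 h1
    obtain ⟨hl0, he0⟩ := h0
    obtain ⟨hl1, he1⟩ := h1
    have hg0 : p.getD 0 0 = f := by rw [List.getD_eq_getElem p 0 hl0, he0]
    have hg1 : p.getD 1 0 = c := by rw [List.getD_eq_getElem p 0 hl1, he1]
    exact ⟨p, hp, ⟨⟨by omega, by omega, by omega, by omega, by omega⟩,
      by rw [hg0]; exact hfi⟩, by rw [hg1]; exact hcj⟩
  · rintro ⟨p, hp, ⟨⟨hlen, h00, h0F, h10, h1C⟩, hgi⟩, hgj⟩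
    refine ⟨p.getD 0 0, ⟨h00, h0F⟩, p.getD 1 0, ⟨h10, h1C⟩, p, hp, ⟨⟨?_, ?_⟩, hgi⟩, hgj⟩
    · rw [PySem.List.pyGet?_of_nonneg p (by norm_num)]
      norm_num
      rw [List.getElem?_eq_some_iff]
      exact ⟨by omega, (List.getD_eq_getElem p 0 (by omega)).symm⟩
    · rw [PySem.List.pyGet?_of_nonneg p (by norm_num)]
      norm_num
      rw [List.getElem?_eq_some_iff]
      exact ⟨by omega, (List.getD_eq_getElem p 0 (by omega)).symm⟩

-- ===== VERDICT (by name: the statement is the Claim_ definition above) =====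
theorem agregar_paredes_lab_spec : Claim_equal_agregar_paredes_lab := by
  intro laberinto muro FILAS COLUMNAS _hdom _hpre
  unfold Spec_agregar_paredes_lab
  rw [portA_markGrid, portB_markGrid]
  exact markGrid_congr laberinto (fun i j => preds_eq muro FILAS COLUMNAS i j)
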